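-- pv_equiv track=rewrite | github.com/ti-mm/ReadingBench | QA/multihop_qa/mapping_llm.py | _is_commented_line
-- ===== SOURCE A (Python) =====
-- def _is_commented_line(text: str, index: int) -> bool:
--     """
--     判断 index 位置是否处于被 % 注释掉的行内。
--     """
--     line_start = text.rfind("\n", 0, index) + 1
--     percent = text.find("%", line_start, index)
--     while percent != -1:
--         if percent == line_start or text[percent - 1] != "\\":
--             return True
--         percent = text.find("%", percent + 1, index)
--     return False
-- ===== SOURCE B (Python) =====
-- def _is_commented_line(text: str, index: int) -> bool:
--     """
--     判断 index 位置是否处于被 % 注释掉的行内。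
--     """
--     line_start = text.rfind("\n", 0, index) + 1
--     prev = None
--     for ch in text[line_start:index]:
--         if ch == "%" and prev != "\\":
--             return True
--         prev = ch
--     return False
-- ===== Notes on version B (the rewrite author's own statement) =====
-- stated objective: simpler
-- what changed: Replaces the repeated text.find('%',...) scan-and-skip loop over absolute indices with a single previous-character scan over the sliced line segment text[line_start:index].
import Mathlib
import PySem

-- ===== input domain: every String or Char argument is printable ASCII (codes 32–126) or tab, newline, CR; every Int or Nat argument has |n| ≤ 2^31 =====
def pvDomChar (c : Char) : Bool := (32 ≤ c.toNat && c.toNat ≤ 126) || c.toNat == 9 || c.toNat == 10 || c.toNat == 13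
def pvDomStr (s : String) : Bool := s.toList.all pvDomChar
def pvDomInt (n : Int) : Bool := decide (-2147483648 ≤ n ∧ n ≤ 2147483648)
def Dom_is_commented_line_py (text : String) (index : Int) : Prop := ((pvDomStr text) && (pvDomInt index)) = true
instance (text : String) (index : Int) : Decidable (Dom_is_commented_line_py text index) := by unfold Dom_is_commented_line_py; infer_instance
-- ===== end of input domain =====

-- B replaces A's repeated text.find('%', …) skip loop with a single previous-character
-- scan over the sliced line segment text[line_start:index] (objective: simpler).

-- ===== PORT A =====
-- A's while loop; fuel = len(text)+1 is a totality guard only (percent strictly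
-- increases and is bounded by len(text); sufficiency is proved below).
def pvLoopA (cs : List Char) (ls index : Int) : Nat → Int → Bool
  | 0, _ => false
  | fuel + 1, percent =>
    if percent == -1 then false
    else if percent == ls || !(PySem.List.pyGet? cs (percent - 1) == some '\\') then true
    else pvLoopA cs ls index fuel (PySem.Chars.findFrom cs ['%'] (percent + 1) (some index))

def is_commented_line_py (text : String) (index : Int) : Bool :=
  pvLoopA text.toList (PySem.Chars.rfindFrom text.toList ['\n'] 0 (some index) + 1) index
    (text.toList.length + 1)
    (PySem.Chars.findFrom text.toList ['%']
      (PySem.Chars.rfindFrom text.toList ['\n'] 0 (some index) + 1) (some index))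

-- ===== PORT B =====
-- the for-loop of Source B: prev carries the previous character (None at line start)
def pvScanB (prev : Option Char) : List Char → Bool
  | [] => false
  | ch :: rest =>
    if ch == '%' && !(prev == some '\\') then true else pvScanB (some ch) rest

def is_commented_line_py_alt (text : String) (index : Int) : Bool :=
  pvScanB none
    (PySem.List.slice text.toList
      (some (PySem.Chars.rfindFrom text.toList ['\n'] 0 (some index) + 1)) (some index))

-- ===== PRECONDITION & SPEC =====
def Spec_is_commented_line_py (text : String) (index : Int) (out : Bool) : Prop := out = is_commented_line_py_alt text index
instance (text : String) (index : Int) (out : Bool) : Decidable (Spec_is_commented_line_py text index out) := by unfold Spec_is_commented_line_py; infer_instance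

-- ===== CLAIM (what is proved, stated in full; the proofs are below) =====
def Claim_equal_is_commented_line_py : Prop := ∀ (text : String) (index : Int), Dom_is_commented_line_py text index → Spec_is_commented_line_py text index (is_commented_line_py text index)

-- ===== LEMMAS AND PROOFS =====

-- the clamped end bound shared by find, rfind and slice (Python slice-bound rule)
def pvE (cs : List Char) (idx : Int) : Nat :=
  (if (cs.length : Int) < idx then (cs.length : Int)
   else if idx < 0 then (if idx + cs.length < 0 then 0 else idx + cs.length) else idx).toNat

lemma pvE_le (cs : List Char) (idx : Int) : pvE cs idx ≤ cs.length := by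
  unfold pvE; split_ifs <;> omega

-- rfind.go never returns below -1 (the prelude has no lower-bound lemma for rfind)
lemma pv_neg_one_le_rfind_go (s sub : List Char) : ∀ k, -1 ≤ PySem.Chars.rfind.go s sub k := by
  intro k
  induction k with
  | zero => simp only [PySem.Chars.rfind.go]; split <;> norm_num
  | succ j ih =>
    simp only [PySem.Chars.rfind.go]
    split
    · omega
    · exact ih

lemma pv_go_succ (s sub : List Char) (k : Nat) : 0 ≤ PySem.Chars.rfind.go s sub k + 1 := by
  have := pv_neg_one_le_rfind_go s sub k; omega

-- line_start = text.rfind('\n', 0, index) + 1 is nonnegative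
lemma pv_line_start_nonneg (cs : List Char) (idx : Int) :
    0 ≤ PySem.Chars.rfindFrom cs ['\n'] 0 (some idx) + 1 := by
  simp only [PySem.Chars.rfindFrom, PySem.Chars.rfind]
  split_ifs <;>
    first
      | omega
      | exact pv_go_succ _ _ _
      | (simp only [zero_add]; exact pv_go_succ _ _ _)

-- findFrom with a natural start and an end bound, in window form
lemma pv_findFrom_some (cs : List Char) (idx : Int) (k : Nat) :
    PySem.Chars.findFrom cs ['%'] (k : Int) (some idx) =
      (if (pvE cs idx : Int) < (k : Int) then -1
       else if PySem.Chars.find ((cs.take (pvE cs idx)).drop k) ['%'] = -1 then -1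
       else (k : Int) + PySem.Chars.find ((cs.take (pvE cs idx)).drop k) ['%']) := by
  simp only [PySem.Chars.findFrom]
  have hk : ¬ ((k : Int) < 0) := by omega
  simp only [hk, if_false, Int.toNat_natCast]
  have he : (if (cs.length : Int) < idx then (cs.length : Int)
      else if idx < 0 then (if idx + cs.length < 0 then 0 else idx + cs.length) else idx)
      = ((pvE cs idx : Nat) : Int) := by
    unfold pvE; split_ifs <;> omega
  rw [he]
  simp only [Int.toNat_natCast]

-- PySem.List.slice's clamp agrees with pvE
lemma pv_clamp_eq (cs : List Char) (idx : Int) :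
    PySem.List.clampIdx cs.length idx = pvE cs idx := by
  unfold PySem.List.clampIdx pvE; split_ifs <;> omega

-- the slice text[line_start:index] is the window used by pv_main
lemma pv_slice_eq (cs : List Char) (idx : Int) (L : Nat) :
    PySem.List.slice cs (some (L : Int)) (some idx) =
      (cs.take (pvE cs idx)).drop L := by
  simp only [PySem.List.slice, pv_clamp_eq, List.drop_take]
  have hL' : pvE cs (L : Int) = min L cs.length := by
    unfold pvE; split_ifs <;> omega
  rw [hL']
  by_cases hL : L ≤ cs.length
  · rw [min_eq_left hL]
  · rw [min_eq_right (by omega : cs.length ≤ L)]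
    rw [List.drop_eq_nil_of_le (le_refl cs.length), List.drop_eq_nil_of_le (by omega)]
    simp

-- [a] is a prefix of l iff l starts with a
lemma pv_singleton_prefix (a : Char) (l : List Char) : [a] <+: l ↔ l.head? = some a := by
  cases l <;> simp [List.cons_prefix_cons, eq_comm]

-- find w ['%'] = -1 iff w has no '%'
lemma pv_find_pct_none (w : List Char) :
    PySem.Chars.find w ['%'] = -1 ↔ ∀ j : Nat, w[j]? ≠ some '%' := by
  rw [PySem.Chars.find_eq_neg_one_iff, ← PySem.Chars.isIn_iff_infix,
    ← PySem.Chars.exists_prefix_drop_iff_isIn]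
  push Not
  constructor
  · intro h j hj
    exact h j (by rw [pv_singleton_prefix, List.head?_drop]; exact hj)
  · intro h j hj
    exact h j (by rw [pv_singleton_prefix, List.head?_drop] at hj; exact hj)

-- find w ['%'] points at the first '%'
lemma pv_find_pct_spec (w : List Char) (h : ¬ PySem.Chars.find w ['%'] = -1) :
    0 ≤ PySem.Chars.find w ['%'] ∧
    w[(PySem.Chars.find w ['%']).toNat]? = some '%' ∧
    ∀ i < (PySem.Chars.find w ['%']).toNat, w[i]? ≠ some '%' := by
  have hle := PySem.Chars.neg_one_le_find w ['%']
  have h0 : 0 ≤ PySem.Chars.find w ['%'] := by omega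
  obtain ⟨h1, h2⟩ := PySem.Chars.find_spec h0
  refine ⟨h0, ?_, ?_⟩
  · rw [pv_singleton_prefix, List.head?_drop] at h1; exact h1
  · intro i hi hic
    exact h2 i hi (by rw [pv_singleton_prefix, List.head?_drop]; exact hic)

-- a '%'-free list scans to false whatever prev is
lemma pv_scanB_no_pct : ∀ (xs : List Char) (prev : Option Char),
    (∀ j : Nat, xs[j]? ≠ some '%') → pvScanB prev xs = false := by
  intro xs
  induction xs with
  | nil => intro _ _; rfl
  | cons ch t ih =>
    intro prev h
    have h0 : ch ≠ '%' := by have := h 0; simpa using this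
    simp only [pvScanB]
    rw [if_neg (by simp [h0])]
    exact ih (some ch) (fun j => by have := h (j + 1); simpa using this)

-- the last character seen by the scan
def pvPrevA (prev : Option Char) (xs : List Char) : Option Char :=
  xs.foldl (fun _ c => some c) prev

lemma pv_prevA_eq : ∀ (xs : List Char) (prev : Option Char),
    pvPrevA prev xs = (if xs = [] then prev else xs.getLast?) := by
  intro xs
  induction xs with
  | nil => intro _; rfl
  | cons ch t ih =>
    intro prev
    show pvPrevA (some ch) t = _
    rw [ih (some ch)]
    cases t <;> simp [List.getLast?_cons]

-- scanning past a '%'-free block only updates prev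
lemma pv_scanB_append_no : ∀ (xs ys : List Char) (prev : Option Char),
    (∀ j : Nat, xs[j]? ≠ some '%') →
    pvScanB prev (xs ++ ys) = pvScanB (pvPrevA prev xs) ys := by
  intro xs
  induction xs with
  | nil => intro ys prev _; rfl
  | cons ch t ih =>
    intro ys prev h
    have h0 : ch ≠ '%' := by have := h 0; simpa using this
    simp only [List.cons_append, pvScanB]
    rw [if_neg (by simp [h0])]
    rw [ih ys (some ch) (fun j => by have := h (j + 1); simpa using this)]
    rfl

-- the main loop/scan correspondence, by induction on the fuel
lemma pv_main (cs : List Char) (idx : Int) (L : Nat) :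
    ∀ (fuel k : Nat), L ≤ k → cs.length < k + fuel →
    pvLoopA cs (L : Int) idx fuel (PySem.Chars.findFrom cs ['%'] (k : Int) (some idx)) =
    pvScanB (if k = L then none else cs[k-1]?)
      ((cs.take (pvE cs idx)).drop k) := by
  intro fuel
  induction fuel with
  | zero =>
    intro k hLk hlen
    have h1 : (cs.take (pvE cs idx)).drop k = [] :=
      List.drop_eq_nil_of_le (by rw [List.length_take]; have := pvE_le cs idx; omega)
    rw [h1]
    rfl
  | succ fuel ih =>
    intro k hLk hlen
    rw [pv_findFrom_some]
    have hE : pvE cs idx ≤ cs.length := pvE_le cs idx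
    by_cases hek : (pvE cs idx : Int) < (k : Int)
    · rw [if_pos hek]
      have h1 : (cs.take (pvE cs idx)).drop k = [] :=
        List.drop_eq_nil_of_le (by rw [List.length_take]; omega)
      rw [h1]
      rfl
    · rw [if_neg hek]
      have hke : k ≤ pvE cs idx := by omega
      by_cases hr : PySem.Chars.find ((cs.take (pvE cs idx)).drop k) ['%'] = -1
      · rw [if_pos hr]
        rw [pv_scanB_no_pct _ _ ((pv_find_pct_none _).mp hr)]
        rfl
      · rw [if_neg hr]
        have hwlen : ((cs.take (pvE cs idx)).drop k).length = pvE cs idx - k := by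
          rw [List.length_drop, List.length_take]; omega
        obtain ⟨h0, hcur, hmin⟩ := pv_find_pct_spec _ hr
        obtain ⟨r, hfr⟩ : ∃ r : Nat,
            PySem.Chars.find ((cs.take (pvE cs idx)).drop k) ['%'] = (r : Int) :=
          ⟨(PySem.Chars.find ((cs.take (pvE cs idx)).drop k) ['%']).toNat, by omega⟩
        have hrt : (PySem.Chars.find ((cs.take (pvE cs idx)).drop k) ['%']).toNat = r := by
          omega
        rw [hrt] at hcur hmin
        rw [hfr]
        have hrlt : r < pvE cs idx - k := by
          have := (List.getElem?_eq_some_iff.mp hcur).1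
          omega
        have hcs_p : cs[k + r]? = some '%' := by
          rw [List.getElem?_drop, List.getElem?_take, if_pos (by omega)] at hcur
          exact hcur
        -- decompose the window around the first '%'
        obtain ⟨hlt', hw_r⟩ := List.getElem?_eq_some_iff.mp hcur
        have h1 : ((cs.take (pvE cs idx)).drop k).drop r
            = '%' :: ((cs.take (pvE cs idx)).drop k).drop (r + 1) := by
          rw [List.drop_eq_getElem_cons hlt', hw_r]
        have h2 : ((cs.take (pvE cs idx)).drop k).drop (r + 1)
            = (cs.take (pvE cs idx)).drop (k + r + 1) := by
          rw [List.drop_drop, Nat.add_assoc]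
        have hdecomp : (cs.take (pvE cs idx)).drop k =
            ((cs.take (pvE cs idx)).drop k).take r ++ '%' :: (cs.take (pvE cs idx)).drop (k + r + 1) := by
          conv_lhs => rw [← List.take_append_drop r ((cs.take (pvE cs idx)).drop k)]
          rw [h1, h2]
        have htakeno : ∀ j : Nat, (((cs.take (pvE cs idx)).drop k).take r)[j]? ≠ some '%' := by
          intro j
          rw [List.getElem?_take]
          split_ifs with hj
          · exact hmin j hj
          · simp
        have hprev : pvPrevA (if k = L then none else cs[k-1]?)
            (((cs.take (pvE cs idx)).drop k).take r)
            = (if k + r = L then none else cs[k + r - 1]?) := by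
          by_cases hr0 : r = 0
          · rw [hr0]
            simp [pvPrevA]
          · rw [pv_prevA_eq]
            rw [if_neg (by
              intro hnil
              have hc := congrArg List.length hnil
              rw [List.length_take] at hc
              simp only [List.length_nil] at hc
              omega)]
            rw [if_neg (by omega)]
            rw [List.getLast?_eq_getElem?, List.length_take, hwlen]
            have hmr : min r (pvE cs idx - k) = r := by omega
            rw [hmr, List.getElem?_take, if_pos (by omega), List.getElem?_drop,
              List.getElem?_take, if_pos (by omega)]
            congr 1
            omega
        rw [hdecomp, pv_scanB_append_no _ _ _ htakeno, hprev]
        -- both sides now look at position k + r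
        have hcast : (k : Int) + (r : Int) = ((k + r : Nat) : Int) := by push_cast; ring
        rw [hcast]
        simp only [pvLoopA, pvScanB]
        rw [if_neg (by simp only [beq_iff_eq]; omega)]
        by_cases hpL : k + r = L
        · rw [if_pos (by simp [hpL]), if_pos (by
            have hk0 : k = L := by omega
            have hr0 : r = 0 := by omega
            simp [hk0, hr0])]
        · have hLcast : (((k + r : Nat) : Int) == (L : Int)) = false := by
            simp only [beq_eq_false_iff_ne, ne_eq]
            omega
          have hp1 : ((k + r : Nat) : Int) - 1 = ((k + r - 1 : Nat) : Int) := by omega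
          rw [if_neg hpL] 
          rw [hLcast, hp1, PySem.List.pyGet?_natCast]
          simp only [Bool.false_or, beq_self_eq_true, Bool.true_and]
          by_cases hsl : cs[k + r - 1]? = some '\\'
          · rw [if_neg (by simp [hsl]), if_neg (by simp [hsl])]
            have hc2 : ((k + r : Nat) : Int) + 1 = ((k + r + 1 : Nat) : Int) := by omega
            rw [hc2]
            have hih := ih (k + r + 1) (by omega) (by omega)
            rw [if_neg (by omega)] at hih
            have hc3 : cs[k + r + 1 - 1]? = some '%' := by
              have he3 : k + r + 1 - 1 = k + r := by omega
              rw [he3]; exact hcs_p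
            rw [hc3] at hih
            exact hih
          · rw [if_pos (by simp [hsl]), if_pos (by simp [hsl])]

-- ===== VERDICT (by name: the statement is the Claim_ definition above) =====
theorem is_commented_line_py_spec : Claim_equal_is_commented_line_py := by
  intro text index _
  have hls := pv_line_start_nonneg text.toList index
  obtain ⟨L, hL⟩ : ∃ L : Nat,
      PySem.Chars.rfindFrom text.toList ['\n'] 0 (some index) + 1 = (L : Int) :=
    ⟨_, (Int.toNat_of_nonneg hls).symm⟩
  show is_commented_line_py text index = is_commented_line_py_alt text index
  unfold is_commented_line_py is_commented_line_py_alt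
  rw [hL, pv_slice_eq]
  have h := pv_main text.toList index L (text.toList.length + 1) L le_rfl (by omega)
  simpa using h
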